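-- pv_equiv track=rewrite | github.com/MRyanEvans/advent-of-code-2022 | src/day10.py | record_instruction_ticks
-- ===== SOURCE A (Python) =====
-- def record_instruction_ticks(instructions):
--     x = 1
--     tick = 0
--     x_at_tick = {}
--     for instruction in instructions:
--         tick += 1
--         x_at_tick[tick] = x
--         if instruction.startswith("addx"):
--             tick += 1
--             x_at_tick[tick] = x
--             x += int(instruction.split()[1])
--     return x_at_tick
-- ===== SOURCE B (Python) =====
-- def record_instruction_ticks(instructions):
--     # Pass 1: flatten instructions into one per-tick delta per CPU cycle.
--     deltas = []
--     for instruction in instructions: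
--         if instruction.startswith("addx"):
--             deltas += [0, int(instruction.split()[1])]
--         else:
--             deltas.append(0)
--     # Pass 2: uniform branch-free scan over the tick deltas.
--     x = 1
--     x_at_tick = {}
--     for tick, delta in enumerate(deltas, 1):
--         x_at_tick[tick] = x
--         x += delta
--     return x_at_tick
-- ===== Notes on version B (the rewrite author's own statement) =====
-- stated objective: alternative
-- what changed: B splits A's single stateful loop into two passes: it first flattens the instructions into one per-cycle delta list (noop -> [0], addx -> [0, v]), then runs a uniform branch-free enumerate scan over the deltas to record x per tick.
import Mathlib
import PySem

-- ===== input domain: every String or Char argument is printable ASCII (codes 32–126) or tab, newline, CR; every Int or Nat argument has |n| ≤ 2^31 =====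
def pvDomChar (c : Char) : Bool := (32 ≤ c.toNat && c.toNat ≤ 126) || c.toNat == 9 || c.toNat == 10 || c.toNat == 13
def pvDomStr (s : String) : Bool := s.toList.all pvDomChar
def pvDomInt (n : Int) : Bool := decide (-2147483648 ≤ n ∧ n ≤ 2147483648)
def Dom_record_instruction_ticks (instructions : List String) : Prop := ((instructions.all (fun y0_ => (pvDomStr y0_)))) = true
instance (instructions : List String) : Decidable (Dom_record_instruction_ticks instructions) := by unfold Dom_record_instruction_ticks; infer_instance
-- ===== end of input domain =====

-- B re-decomposes A's single stateful loop into a delta-flattening pass plus a uniform enumerate scan; return values proved equal wherever A returns.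

-- ===== PORT A =====
-- int(instruction.split()[1]); none exactly where Python raises (IndexError/ValueError)
def pvParseArgA (instruction : String) : Option Int :=
  (PySem.List.pyGet? (PySem.Str.split₀ instruction) 1).bind PySem.Int.ofStr?

-- A's for-loop; state (x, tick, x_at_tick); none = the loop raised
def pvLoopA : List String → Int → Int → PySem.Dict Int Int → Option (PySem.Dict Int Int)
  | [], _, _, d => some d
  | instruction :: rest, x, tick, d =>
    let tick1 := tick + 1
    let d1 := d.insert tick1 x
    if PySem.Str.startswith instruction "addx" then
      let tick2 := tick1 + 1
      let d2 := d1.insert tick2 x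
      match pvParseArgA instruction with
      | some v => pvLoopA rest (x + v) tick2 d2
      | none => none
    else
      pvLoopA rest x tick1 d1

def record_instruction_ticks (instructions : List String) : List (Int × Int) :=
  match pvLoopA instructions 1 0 PySem.Dict.empty with
  | some d => d.items
  | none => []   -- unreachable under Pre_ (Python raises here)

-- ===== PORT B =====
-- pass 1: flatten into per-tick deltas; none = int()/[1] raised
def pvDeltasB : List String → Option (List Int)
  | [] => some []
  | instruction :: rest =>
    if PySem.Str.startswith instruction "addx" then
      match (PySem.List.pyGet? (PySem.Str.split₀ instruction) 1).bind PySem.Int.ofStr? with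
      | some v => (pvDeltasB rest).map (fun t => 0 :: v :: t)
      | none => none
    else
      (pvDeltasB rest).map (fun t => 0 :: t)

-- pass 2: uniform scan, 'for tick, delta in enumerate(deltas, 1)'
def pvScanB : List Int → Int → Int → List (Int × Int)
  | [], _, _ => []
  | delta :: rest, tick, x => (tick + 1, x) :: pvScanB rest (tick + 1) (x + delta)

def record_instruction_ticks_alt (instructions : List String) : List (Int × Int) :=
  match pvDeltasB instructions with
  | some deltas => pvScanB deltas 0 1
  | none => []   -- unreachable under Pre_

-- ===== PRECONDITION & SPEC =====
-- Pre_ excludes exactly the inputs where Python A raises: an instruction starting with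
-- "addx" whose second whitespace token is missing (IndexError) or not an int literal (ValueError).
def Pre_record_instruction_ticks (instructions : List String) : Prop :=
  ∀ s ∈ instructions, PySem.Str.startswith s "addx" = true →
    ((PySem.List.pyGet? (PySem.Str.split₀ s) 1).bind PySem.Int.ofStr?).isSome = true
instance (instructions : List String) : Decidable (Pre_record_instruction_ticks instructions) := by
  unfold Pre_record_instruction_ticks; infer_instance

def pvWitness_record_instruction_ticks : List String := ["noop", "addx 3", "addx -5"]

def Spec_record_instruction_ticks (instructions : List String) (out : List (Int × Int)) : Prop := out = record_instruction_ticks_alt instructions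
instance (instructions : List String) (out : List (Int × Int)) : Decidable (Spec_record_instruction_ticks instructions out) := by unfold Spec_record_instruction_ticks; infer_instance

-- ===== CLAIM (what is proved, stated in full; the proofs are below) =====
def Claim_equal_record_instruction_ticks : Prop := ∀ (instructions : List String), Dom_record_instruction_ticks instructions → Pre_record_instruction_ticks instructions → Spec_record_instruction_ticks instructions (record_instruction_ticks instructions)

-- ===== LEMMAS AND PROOFS =====

-- A's loop equals: flatten to deltas, then scan appended onto the accumulated dict items.
theorem pvLoop_eq_deltas (l : List String) : ∀ (x tick : Int) (d : PySem.Dict Int Int),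
    (∀ k ∈ d.keys, k ≤ tick) → d.keys.Nodup →
    pvLoopA l x tick d = (pvDeltasB l).map (fun ds => PySem.Dict.mk (d.items ++ pvScanB ds tick x)) := by
  induction l with
  | nil =>
    intro x tick d _ _
    simp [pvLoopA, pvDeltasB, pvScanB]
  | cons instruction rest ih =>
    intro x tick d hle hnd
    have hfresh1 : d.contains (tick + 1) = false := by
      rw [PySem.Dict.contains_eq_decide_mem_keys]
      simp only [decide_eq_false_iff_not]
      intro hm; have := hle _ hm; omega
    have hitems1 : (d.insert (tick + 1) x).items = d.items ++ [(tick + 1, x)] :=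
      PySem.Dict.items_insert_of_not_contains _ _ hfresh1
    have hkeys1 : (d.insert (tick + 1) x).keys = d.keys ++ [tick + 1] := by
      simp only [PySem.Dict.keys, hitems1, List.map_append, List.map_cons, List.map_nil]
    have hle1 : ∀ k ∈ (d.insert (tick + 1) x).keys, k ≤ tick + 1 := by
      intro k hk
      rw [hkeys1] at hk
      rcases List.mem_append.mp hk with h | h
      · have := hle _ h; omega
      · simp at h; omega
    have hnd1 : (d.insert (tick + 1) x).keys.Nodup := PySem.Dict.nodup_keys_insert _ _ _ hnd
    by_cases hsw : PySem.Str.startswith instruction "addx" = true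
    · -- addx branch
      have hfresh2 : (d.insert (tick + 1) x).contains (tick + 1 + 1) = false := by
        rw [PySem.Dict.contains_eq_decide_mem_keys]
        simp only [decide_eq_false_iff_not]
        intro hm; have := hle1 _ hm; omega
      have hitems2 : ((d.insert (tick + 1) x).insert (tick + 1 + 1) x).items
          = d.items ++ [(tick + 1, x), (tick + 1 + 1, x)] := by
        rw [PySem.Dict.items_insert_of_not_contains _ _ hfresh2, hitems1]; simp
      have hle2 : ∀ k ∈ ((d.insert (tick + 1) x).insert (tick + 1 + 1) x).keys, k ≤ tick + 1 + 1 := by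
        intro k hk
        simp only [PySem.Dict.keys, hitems2, List.map_append] at hk
        rcases List.mem_append.mp hk with h | h
        · have := hle _ h; omega
        · simp at h; omega
      have hnd2 : ((d.insert (tick + 1) x).insert (tick + 1 + 1) x).keys.Nodup :=
        PySem.Dict.nodup_keys_insert _ _ _ hnd1
      cases hp : (PySem.List.pyGet? (PySem.Str.split₀ instruction) 1).bind PySem.Int.ofStr? with
      | none =>
        simp only [pvLoopA, pvDeltasB, pvParseArgA, hp, if_pos hsw, Option.map_none]
      | some v =>
        simp only [pvLoopA, pvDeltasB, pvParseArgA, hp, if_pos hsw]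
        rw [ih (x + v) (tick + 1 + 1) _ hle2 hnd2]
        cases pvDeltasB rest with
        | none => rfl
        | some ds =>
          simp only [Option.map_some]
          congr 1
          apply PySem.Dict.ext
          simp [hitems2, pvScanB]
    · -- noop branch
      simp only [pvLoopA, pvDeltasB, if_neg hsw]
      rw [ih x (tick + 1) _ hle1 hnd1]
      cases pvDeltasB rest with
      | none => rfl
      | some ds =>
        simp only [Option.map_some]
        congr 1
        apply PySem.Dict.ext
        simp [hitems1, pvScanB]

theorem pre_deltas_isSome (instructions : List String)
    (h : Pre_record_instruction_ticks instructions) : (pvDeltasB instructions).isSome = true := by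
  induction instructions with
  | nil => simp [pvDeltasB]
  | cons i rest ih =>
    have hrest : (pvDeltasB rest).isSome = true := by
      apply ih; intro s hs; exact h s (List.mem_cons_of_mem _ hs)
    by_cases hsw : PySem.Str.startswith i "addx" = true
    · have hi := h i (List.mem_cons_self) hsw
      cases hp : (PySem.List.pyGet? (PySem.Str.split₀ i) 1).bind PySem.Int.ofStr? with
      | none => rw [hp] at hi; simp at hi
      | some v => simp only [pvDeltasB, if_pos hsw, hp, Option.isSome_map]; exact hrest
    · simp only [pvDeltasB, if_neg hsw, Option.isSome_map]; exact hrest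

-- ===== VERDICT (by name: the statement is the Claim_ definition above) =====
theorem record_instruction_ticks_spec : Claim_equal_record_instruction_ticks := by
  intro instructions _ hpre
  unfold Spec_record_instruction_ticks record_instruction_ticks record_instruction_ticks_alt
  have hkey := pvLoop_eq_deltas instructions 1 0 PySem.Dict.empty
    (by simp [PySem.Dict.keys_empty]) (by simp [PySem.Dict.keys_empty])
  rw [hkey]
  cases hd : pvDeltasB instructions with
  | none => have := pre_deltas_isSome instructions hpre; rw [hd] at this; simp at this
  | some ds => simp [PySem.Dict.empty]
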